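-- pv_equiv track=rewrite | github.com/SammyJdot/passwdpwn | passwdpwn.py | leetify
-- ===== SOURCE A (Python) =====
-- leet_map = {
--     'a': ['a', '@', '4'],
--     'e': ['e', '3'],
--     'i': ['i', '1', '!'],
--     'o': ['o', '0'],
--     's': ['s', '$', '5'],
--     't': ['t', '7']
-- }
--
-- def leetify(word):
--     combos = set()
--     def helper(idx, current):
--         if idx == len(word):
--             combos.add(''.join(current))
--             return
--         char = word[idx].lower()
--         subs = leet_map.get(char, [word[idx]])
--         for s in subs:
--             helper(idx + 1, current + [s])
--     helper(0, [])
--     return combos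
-- ===== SOURCE B (Python) =====
-- leet_map = {
--     'a': ['a', '@', '4'],
--     'e': ['e', '3'],
--     'i': ['i', '1', '!'],
--     'o': ['o', '0'],
--     's': ['s', '$', '5'],
--     't': ['t', '7']
-- }
--
-- def leetify(word):
--     # Iterative breadth-first product: extend every prefix by each substitution.
--     prefixes = ['']
--     for ch in word:
--         subs = leet_map.get(ch.lower(), [ch])
--         prefixes = [p + s for p in prefixes for s in subs]
--     return set(prefixes)
-- ===== Notes on version B (the rewrite author's own statement) =====
-- stated objective: simpler
-- what changed: Replaces the recursive DFS helper with a closure-captured accumulator set by an iterative left fold that extends a flat list of prefixes with each position's substitutions (a Cartesian product built breadth-first), then wraps the list in a set.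
import Mathlib
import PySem

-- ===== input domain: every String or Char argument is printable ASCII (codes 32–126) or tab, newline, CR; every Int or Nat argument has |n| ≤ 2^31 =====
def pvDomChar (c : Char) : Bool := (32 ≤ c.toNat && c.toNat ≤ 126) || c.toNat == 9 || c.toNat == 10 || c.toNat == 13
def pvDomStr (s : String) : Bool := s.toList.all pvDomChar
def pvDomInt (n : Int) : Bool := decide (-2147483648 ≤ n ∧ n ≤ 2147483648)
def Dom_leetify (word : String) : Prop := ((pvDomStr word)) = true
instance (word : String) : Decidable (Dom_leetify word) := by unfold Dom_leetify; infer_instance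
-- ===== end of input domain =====

-- B replaces A's recursive DFS helper (mutating an outer set) by an iterative fold that
-- extends a flat list of prefixes position by position; objective: simpler.

-- ===== PORT A =====
def leetMap : PySem.Dict String (List String) := PySem.Dict.ofList
  [("a", ["a", "@", "4"]), ("e", ["e", "3"]), ("i", ["i", "1", "!"]),
   ("o", ["o", "0"]), ("s", ["s", "$", "5"]), ("t", ["t", "7"])]

-- the nested 'helper': recursion over the remaining characters, the for-loop is a foldl
def leetifyHelper (cs : List Char) (current : List String) (combos : PySem.Set String) :
    PySem.Set String :=
  match cs with
  | [] => PySem.Set.add combos (PySem.Str.join "" current)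
  | c :: rest =>
      let subs := PySem.Dict.getD leetMap (PySem.Str.lower (String.ofList [c])) [String.ofList [c]]
      subs.foldl (fun acc s => leetifyHelper rest (current ++ [s]) acc) combos

def leetify (word : String) : List String :=
  leetifyHelper word.toList [] PySem.Set.empty

-- ===== PORT B =====
def leetify_alt (word : String) : List String :=
  let prefixes := word.toList.foldl
    (fun prefixes c =>
      let subs := PySem.Dict.getD leetMap (PySem.Str.lower (String.ofList [c])) [String.ofList [c]]
      prefixes.flatMap (fun p => subs.map (fun s => p ++ s)))
    [""]
  PySem.Set.ofList prefixes

-- ===== PRECONDITION & SPEC =====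
def Spec_leetify (word : String) (out : List String) : Prop := out = leetify_alt word
instance (word : String) (out : List String) : Decidable (Spec_leetify word out) := by unfold Spec_leetify; infer_instance

-- ===== CLAIM (what is proved, stated in full; the proofs are below) =====
def Claim_equal_leetify : Prop := ∀ (word : String), Dom_leetify word → Spec_leetify word (leetify word)

-- ===== LEMMAS AND PROOFS =====

-- proof-only helper: the list of full words reachable from prefix `pre` through chars `cs`
def pvBuild (cs : List Char) (pre : String) : List String :=
  match cs with
  | [] => [pre]
  | c :: rest =>
      (PySem.Dict.getD leetMap (PySem.Str.lower (String.ofList [c])) [String.ofList [c]]).flatMap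
        (fun s => pvBuild rest (pre ++ s))

theorem pvJoin_append (xs : List String) (s : String) :
    PySem.Str.join "" (xs ++ [s]) = PySem.Str.join "" xs ++ s := by
  have h : ∀ l : List (List Char), (List.intersperse ([] : List Char) l).flatten = l.flatten := by
    intro l
    induction l with
    | nil => simp
    | cons a t ih =>
      cases t with
      | nil => simp
      | cons b u => simp_all [List.intersperse]
  simp [PySem.Str.join, PySem.Chars.join, List.intercalate, h, String.ofList_append]

theorem pvHelper_eq (cs : List Char) :
    ∀ (current : List String) (combos : PySem.Set String),
      leetifyHelper cs current combos =
        (pvBuild cs (PySem.Str.join "" current)).foldl PySem.Set.add combos := by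
  induction cs with
  | nil => intro current combos; simp [leetifyHelper, pvBuild]
  | cons c rest ih =>
    intro current combos
    simp only [leetifyHelper, pvBuild]
    rw [List.foldl_flatMap]
    apply PySem.List.foldl_congr_mem
    intro acc s _
    rw [ih (current ++ [s]) acc, pvJoin_append]

theorem pvFold_eq (cs : List Char) :
    ∀ (ps : List String),
      cs.foldl
        (fun prefixes c =>
          let subs := PySem.Dict.getD leetMap (PySem.Str.lower (String.ofList [c])) [String.ofList [c]]
          prefixes.flatMap (fun p => subs.map (fun s => p ++ s)))
        ps
      = ps.flatMap (fun p => pvBuild cs p) := by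
  induction cs with
  | nil => intro ps; simp [pvBuild]
  | cons c rest ih =>
    intro ps
    rw [List.foldl_cons, ih]
    simp only [List.flatMap_map, List.flatMap_assoc, pvBuild]

-- ===== VERDICT (by name: the statement is the Claim_ definition above) =====
theorem leetify_spec : Claim_equal_leetify := by
  intro word _
  unfold Spec_leetify leetify leetify_alt
  rw [pvHelper_eq, pvFold_eq]
  simp [PySem.Str.join, PySem.Chars.join, List.intercalate, PySem.Set.ofList_eq_foldl]
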